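-- pv_equiv track=rewrite | github.com/Scarvy/awesome-readwise | scripts/update_readwise_tools.py | insert_into_other_section
-- ===== SOURCE A (Python) =====
-- from typing import Dict, Iterable, List, Optional, Set
--
-- def insert_into_other_section(readme_text: str, entries: List[str]) -> str:
--     lines = readme_text.splitlines()
--     try:
--         start_index = lines.index("### Other")
--     except ValueError:
--         raise RuntimeError('Could not locate "### Other" section in README.md')
--
--     insert_index = len(lines)
--     for idx in range(start_index + 1, len(lines)):
--         line = lines[idx]
--         if line.startswith("## ") or line.startswith("### "):
--             insert_index = idx
--             break
--
--     # Insert before trailing blank lines to keep list continuity.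
--     while insert_index > start_index and lines[insert_index - 1].strip() == "":
--         insert_index -= 1
--
--     insert_lines = list(entries)
--     if insert_index > 0 and lines[insert_index - 1].strip() != "":
--         insert_lines = ["", *insert_lines]
--     updated_lines = lines[:insert_index] + insert_lines + lines[insert_index:]
--     return "\n".join(updated_lines) + "\n"
-- ===== SOURCE B (Python) =====
-- def insert_into_other_section(readme_text, entries):
--     lines = readme_text.splitlines()
--     if "### Other" not in lines:
--         raise RuntimeError('Could not locate "### Other" section in README.md')
--     start = lines.index("### Other")
--     # single forward pass: last index of a non-blank line in the section
--     last_content = start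
--     for idx in range(start + 1, len(lines)):
--         line = lines[idx]
--         if line.startswith("## ") or line.startswith("### "):
--             break
--         if line.strip() != "":
--             last_content = idx
--     k = last_content + 1
--     # lines[k-1] is the last non-blank line (at worst the header itself),
--     # so a separating blank line is always wanted before the new entries
--     return "\n".join(lines[:k] + ["", *entries] + lines[k:]) + "\n"
-- ===== Notes on version B (the rewrite author's own statement) =====
-- stated objective: simpler
-- what changed: Replaces A's forward header scan followed by a backward walk over trailing blank lines with one forward pass that tracks the last non-blank line of the section, and drops A's conditional blank-line prepend (always true, since the insertion point always follows a non-blank line) for an unconditional one.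
import Mathlib
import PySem

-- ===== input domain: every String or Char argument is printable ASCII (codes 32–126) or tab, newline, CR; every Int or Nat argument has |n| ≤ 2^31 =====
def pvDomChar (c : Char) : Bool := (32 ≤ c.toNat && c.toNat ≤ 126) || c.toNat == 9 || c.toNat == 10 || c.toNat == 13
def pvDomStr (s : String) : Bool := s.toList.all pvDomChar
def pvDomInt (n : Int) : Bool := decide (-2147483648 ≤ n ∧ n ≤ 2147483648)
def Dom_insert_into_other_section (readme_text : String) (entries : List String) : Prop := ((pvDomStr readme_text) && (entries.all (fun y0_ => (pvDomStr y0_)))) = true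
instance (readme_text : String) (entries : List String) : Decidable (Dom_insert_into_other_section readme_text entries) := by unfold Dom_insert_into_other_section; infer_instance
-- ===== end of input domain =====

-- B replaces A's two loops (forward header scan + backward blank-line walk) by one forward
-- pass tracking the last non-blank line, and prepends the separating blank line unconditionally.

-- ===== PORT A =====
-- forward scan: first idx ≥ idx0 whose line starts a new section, else len(lines)
def pvFindHeaderA (lines : List String) (idx : Nat) : Nat :=
  if idx < lines.length then
    if PySem.Str.startswith (lines.getD idx "") "## " || PySem.Str.startswith (lines.getD idx "") "### " then
      idx
    else pvFindHeaderA lines (idx + 1)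
  else lines.length
termination_by lines.length - idx

-- backward walk: while insert_index > start and lines[insert_index-1].strip() == ""
def pvBackA (lines : List String) (s : Nat) (i : Nat) : Nat :=
  if s < i ∧ PySem.Str.strip (lines.getD (i - 1) "") = "" then pvBackA lines s (i - 1) else i
termination_by i
decreasing_by omega

def insert_into_other_section (readme_text : String) (entries : List String) : String :=
  let lines := PySem.Str.splitlines readme_text
  match PySem.List.index? lines "### Other" with
  | none => ""  -- Python raises RuntimeError here; excluded by Pre_
  | some s =>
    let ii := pvBackA lines s (pvFindHeaderA lines (s + 1))
    let insert_lines :=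
      if 0 < ii ∧ PySem.Str.strip (lines.getD (ii - 1) "") ≠ "" then "" :: entries else entries
    PySem.Str.join "\n" (lines.take ii ++ insert_lines ++ lines.drop ii) ++ "\n"

-- ===== PORT B =====
-- single forward pass: last index of a non-blank line of the section (at worst the header s)
def pvScanB (lines : List String) (idx : Nat) (last : Nat) : Nat :=
  if idx < lines.length then
    if PySem.Str.startswith (lines.getD idx "") "## " || PySem.Str.startswith (lines.getD idx "") "### " then
      last
    else pvScanB lines (idx + 1) (if PySem.Str.strip (lines.getD idx "") ≠ "" then idx else last)
  else last
termination_by lines.length - idx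

def insert_into_other_section_alt (readme_text : String) (entries : List String) : String :=
  let lines := PySem.Str.splitlines readme_text
  match PySem.List.index? lines "### Other" with
  | none => ""  -- Python raises RuntimeError here; excluded by Pre_
  | some s =>
    let k := pvScanB lines (s + 1) s + 1
    PySem.Str.join "\n" (lines.take k ++ ("" :: entries) ++ lines.drop k) ++ "\n"

-- ===== PRECONDITION & SPEC =====
-- A (and B) raise RuntimeError iff no line equals "### Other"; Pre_ excludes exactly those inputs.
def Pre_insert_into_other_section (readme_text : String) (entries : List String) : Prop :=
  "### Other" ∈ PySem.Str.splitlines readme_text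
instance (readme_text : String) (entries : List String) : Decidable (Pre_insert_into_other_section readme_text entries) := by unfold Pre_insert_into_other_section; infer_instance
def pvWitness_insert_into_other_section : String × List String := ("# T\n### Other\n- x\n", ["- y"])

def Spec_insert_into_other_section (readme_text : String) (entries : List String) (out : String) : Prop := out = insert_into_other_section_alt readme_text entries
instance (readme_text : String) (entries : List String) (out : String) : Decidable (Spec_insert_into_other_section readme_text entries out) := by unfold Spec_insert_into_other_section; infer_instance

-- ===== CLAIM (what is proved, stated in full; the proofs are below) =====
def Claim_equal_insert_into_other_section : Prop := ∀ (readme_text : String) (entries : List String), Dom_insert_into_other_section readme_text entries → Pre_insert_into_other_section readme_text entries → Spec_insert_into_other_section readme_text entries (insert_into_other_section readme_text entries)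

-- ===== LEMMAS AND PROOFS =====

-- A's backward walk from i lands one past the last non-blank index `last` when everything strictly between is blank.
lemma pvBackA_eq (lines : List String) (s last : Nat) (h1 : s ≤ last)
    (hnb : PySem.Str.strip (lines.getD last "") ≠ "") :
    ∀ i, last < i → (∀ t, last < t → t < i → PySem.Str.strip (lines.getD t "") = "") →
      pvBackA lines s i = last + 1 := by
  intro i
  induction i using Nat.strong_induction_on with
  | _ i ih =>
    intro hlt hgap
    rw [pvBackA]
    by_cases hb : PySem.Str.strip (lines.getD (i - 1) "") = ""
    · have hne : i ≠ last + 1 := by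
        intro h; apply hnb; simpa [h] using hb
      have h2 : last < i - 1 := by omega
      rw [if_pos ⟨by omega, hb⟩]
      exact ih (i - 1) (by omega) h2 (fun t ht1 ht2 => hgap t ht1 (by omega))
    · rw [if_neg (by tauto)]
      by_cases h : i = last + 1
      · exact h
      · exact absurd (hgap (i - 1) (by omega) (by omega)) hb

-- B's scan result stays a non-blank in-range index.
lemma pvScanB_inv (lines : List String) :
    ∀ idx last, last < lines.length → PySem.Str.strip (lines.getD last "") ≠ "" →
      pvScanB lines idx last < lines.length ∧
      PySem.Str.strip (lines.getD (pvScanB lines idx last) "") ≠ "" := by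
  intro idx last
  fun_induction pvScanB lines idx last with
  | case1 idx last h hh => intro hlt hnb; exact ⟨hlt, hnb⟩
  | case2 idx last h hh ih =>
    intro hlt hnb
    by_cases hc : PySem.Str.strip (lines.getD idx "") = ""
    · rw [dif_neg (by simpa using hc)] at ih
      rw [if_neg (show ¬ PySem.Str.strip (lines.getD idx "") ≠ "" by simpa using hc)]
      exact ih hlt hnb
    · rw [dif_pos hc] at ih
      rw [if_pos hc]
      exact ih h hc
  | case3 idx last h => intro hlt hnb; exact ⟨hlt, hnb⟩

-- core: A's two loops compute B's single pass + 1
lemma main_eq (lines : List String) (s : Nat) :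
    ∀ idx last, last < idx → last < lines.length → s ≤ last →
      PySem.Str.strip (lines.getD last "") ≠ "" →
      (∀ t, last < t → t < idx → PySem.Str.strip (lines.getD t "") = "") →
      pvBackA lines s (pvFindHeaderA lines idx) = pvScanB lines idx last + 1 := by
  intro idx
  fun_induction pvFindHeaderA lines idx with
  | case1 idx h hh =>
    intro last h1 h2 h3 hnb hgap
    rw [pvScanB, if_pos h, if_pos hh]
    exact pvBackA_eq lines s last h3 hnb idx h1 hgap
  | case2 idx h hh ih =>
    intro last h1 h2 h3 hnb hgap
    rw [pvScanB, if_pos h, if_neg hh]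
    by_cases hc : PySem.Str.strip (lines.getD idx "") = ""
    · rw [if_neg (show ¬ PySem.Str.strip (lines.getD idx "") ≠ "" by simpa using hc)]
      refine ih last (by omega) h2 h3 hnb (fun t ht1 ht2 => ?_)
      by_cases ht : t = idx
      · subst ht; exact hc
      · exact hgap t ht1 (by omega)
    · rw [if_pos hc]
      exact ih idx (by omega) h (by omega) hc (fun t ht1 ht2 => by omega)
  | case3 idx h =>
    intro last h1 h2 h3 hnb hgap
    rw [pvScanB, if_neg h]
    exact pvBackA_eq lines s last h3 hnb lines.length h2
      (fun t ht1 ht2 => hgap t ht1 (by omega))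


-- ===== VERDICT (by name: the statement is the Claim_ definition above) =====
theorem insert_into_other_section_spec : Claim_equal_insert_into_other_section := by
  intro readme_text entries _ hpre
  unfold Spec_insert_into_other_section insert_into_other_section insert_into_other_section_alt
  obtain ⟨s, hidx⟩ := Option.isSome_iff_exists.mp
    ((PySem.List.index?_isSome_iff (PySem.Str.splitlines readme_text) "### Other").mpr hpre)
  set lines := PySem.Str.splitlines readme_text with hl
  obtain ⟨hs, hval, -⟩ := PySem.List.getElem_of_index?_eq_some hidx
  have hnb : PySem.Str.strip (lines.getD s "") ≠ "" := by
    rw [List.getD_eq_getElem lines "" hs, hval]; decide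
  have hmain := main_eq lines s (s + 1) s (by omega) hs le_rfl hnb (fun t ht1 ht2 => by omega)
  have hinv := pvScanB_inv lines (s + 1) s hs hnb
  simp only [hidx, hmain, Nat.add_sub_cancel]
  rw [if_pos ⟨Nat.succ_pos _, hinv.2⟩]
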